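-- pv_equiv track=rewrite | github.com/DANCEcollaborative/bazaar | bazaar_server/bazaar_server_lobby/lobby/html_pages/populate_platform_links.py | assign_room_ids
-- ===== SOURCE A (Python) =====
-- from typing import Dict, List, Tuple
--
-- SCRATCHPAD_COLUMN = "scratchpad link"
--
-- def assign_room_ids(rows: List[Dict[str, str]], start_room_id: int) -> List[int]:
--     ids: List[int] = []
--     current_id = start_room_id
--     previous_scratchpad = None
--     for row in rows:
--         scratchpad = (row.get(SCRATCHPAD_COLUMN, "") or "").strip()
--         if previous_scratchpad is None:
--             pass
--         elif scratchpad != previous_scratchpad: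
--             current_id += 1
--         ids.append(current_id)
--         previous_scratchpad = scratchpad
--     return ids
-- ===== SOURCE B (Python) =====
-- from bisect import bisect_right
-- from typing import Dict, List
--
-- SCRATCHPAD_COLUMN = "scratchpad link"
--
-- def assign_room_ids(rows: List[Dict[str, str]], start_room_id: int) -> List[int]:
--     # Each id is computed independently: id[i] = start + (number of run
--     # boundaries at positions <= i), found by binary search in the sorted
--     # boundary-index list.  No running id / previous-value state.
--     vals = [(row.get(SCRATCHPAD_COLUMN, "") or "").strip() for row in rows]
--     boundaries = [i for i, (prev, cur) in enumerate(zip(vals, vals[1:]), 1) if cur != prev]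
--     return [start_room_id + bisect_right(boundaries, i) for i in range(len(vals))]
-- ===== Notes on version B (the rewrite author's own statement) =====
-- stated objective: alternative
-- what changed: Replaces A's stateful scan carrying a running id and previous value with a boundary-index construction: the sorted list of positions where consecutive normalized values differ is built once, then each id is computed independently as start_room_id + bisect_right(boundaries, i).
import Mathlib
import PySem

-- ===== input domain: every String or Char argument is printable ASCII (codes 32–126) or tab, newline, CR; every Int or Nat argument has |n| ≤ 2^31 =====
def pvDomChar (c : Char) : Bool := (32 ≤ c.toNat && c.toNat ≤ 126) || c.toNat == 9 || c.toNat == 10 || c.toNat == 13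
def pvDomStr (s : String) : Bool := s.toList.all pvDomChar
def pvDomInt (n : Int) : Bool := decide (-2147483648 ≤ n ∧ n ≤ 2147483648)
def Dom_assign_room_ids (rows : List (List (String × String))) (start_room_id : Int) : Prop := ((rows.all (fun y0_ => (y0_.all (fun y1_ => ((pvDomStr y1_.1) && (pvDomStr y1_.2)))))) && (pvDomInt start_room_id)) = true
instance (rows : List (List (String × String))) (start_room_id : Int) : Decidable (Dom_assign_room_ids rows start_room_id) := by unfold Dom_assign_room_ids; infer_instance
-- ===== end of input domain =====

-- B replaces A's stateful scan (running id + previous value) with: build the sorted list of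
-- run-boundary indices once, then compute each id independently as start + bisect_right(boundaries, i).

-- ===== PORT A =====
-- (row.get(SCRATCHPAD_COLUMN, "") or "").strip()
def pvScratch (row : List (String × String)) : String :=
  let raw := PySem.Dict.getD (PySem.Dict.mk row) "scratchpad link" ""
  PySem.Str.strip (if raw = "" then "" else raw)

def pvStepA (st : List Int × Int × Option String) (row : List (String × String)) :
    List Int × Int × Option String :=
  let scratchpad := pvScratch row
  match st.2.2 with
  | none => (st.1 ++ [st.2.1], st.2.1, some scratchpad)
  | some p =>
    let cur := if scratchpad ≠ p then st.2.1 + 1 else st.2.1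
    (st.1 ++ [cur], cur, some scratchpad)

def assign_room_ids (rows : List (List (String × String))) (start_room_id : Int) : List Int :=
  (rows.foldl pvStepA ([], start_room_id, none)).1

-- ===== PORT B =====
-- bisect_right(l, x) on a sorted list of distinct Nats = number of elements ≤ x
-- (Source B's library call ported by its contract, as permitted for standard-library calls)
def pvBisectRight (l : List Nat) (x : Nat) : Nat :=
  l.countP (fun b => b ≤ x)

def assign_room_ids_alt (rows : List (List (String × String))) (start_room_id : Int) : List Int :=
  let vals := rows.map pvScratch
  -- [i for i, (prev, cur) in enumerate(zip(vals, vals[1:]), 1) if cur != prev]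
  let boundaries := (((vals.zip (vals.drop 1)).zipIdx 1).filter
      (fun q => q.1.2 ≠ q.1.1)).map Prod.snd
  (List.range vals.length).map (fun i => start_room_id + (pvBisectRight boundaries i : Int))

-- ===== PRECONDITION & SPEC =====
def Spec_assign_room_ids (rows : List (List (String × String))) (start_room_id : Int) (out : List Int) : Prop := out = assign_room_ids_alt rows start_room_id
instance (rows : List (List (String × String))) (start_room_id : Int) (out : List Int) : Decidable (Spec_assign_room_ids rows start_room_id out) := by unfold Spec_assign_room_ids; infer_instance

-- ===== CLAIM (what is proved, stated in full; the proofs are below) =====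
def Claim_equal_assign_room_ids : Prop := ∀ (rows : List (List (String × String))) (start_room_id : Int), Dom_assign_room_ids rows start_room_id → Spec_assign_room_ids rows start_room_id (assign_room_ids rows start_room_id)

-- ===== LEMMAS AND PROOFS =====

-- 0/1 change indicators of the value list after a previous value p
def deltas : String → List String → List Int
  | _, [] => []
  | p, v :: vs => (if v = p then 0 else 1) :: deltas v vs

-- running prefix sums starting from c
def psum : Int → List Int → List Int
  | _, [] => []
  | c, d :: ds => (c + d) :: psum (c + d) ds

-- A's loop, deforested onto the list of normalized values
def specRec : List String → Int → Option String → List Int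
  | [], _, _ => []
  | v :: vs, cur, prev =>
    let c := match prev with
      | none => cur
      | some p => if v ≠ p then cur + 1 else cur
    c :: specRec vs c (some v)

theorem foldA_spec (rows : List (List (String × String)))
    (acc : List Int) (cur : Int) (prev : Option String) :
    (rows.foldl pvStepA (acc, cur, prev)).1 = acc ++ specRec (rows.map pvScratch) cur prev := by
  induction rows generalizing acc cur prev with
  | nil => simp [specRec]
  | cons r rs ih =>
    rw [List.foldl_cons]
    cases prev with
    | none => rw [show pvStepA (acc, cur, none) r = (acc ++ [cur], cur, some (pvScratch r)) from rfl, ih]; simp [specRec]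
    | some p =>
      by_cases h : pvScratch r = p
      · rw [show pvStepA (acc, cur, some p) r = (acc ++ [cur], cur, some (pvScratch r)) from by simp [pvStepA, h], ih]
        simp [specRec, h]
      · rw [show pvStepA (acc, cur, some p) r = (acc ++ [cur + 1], cur + 1, some (pvScratch r)) from by simp [pvStepA, h], ih]
        simp [specRec, h]

theorem specRec_psum (vs : List String) (p : String) (c : Int) :
    specRec vs c (some p) = psum c (deltas p vs) := by
  induction vs generalizing p c with
  | nil => simp [specRec, deltas, psum]
  | cons v vs ih =>
    by_cases h : v = p <;> simp [specRec, deltas, psum, h, ih]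

theorem deltas_length (p : String) (vs : List String) :
    (deltas p vs).length = vs.length := by
  induction vs generalizing p with
  | nil => rfl
  | cons v vs ih => simp [deltas, ih]

-- the boundary-index list of (p :: ws) built from position m, structurally
def bnds : String → List String → Nat → List Nat
  | _, [], _ => []
  | p, w :: ws, m => (if w = p then [] else [m]) ++ bnds w ws (m + 1)

theorem boundaries_eq (ws : List String) (p : String) (m : Nat) :
    ((((p :: ws).zip ws).zipIdx m).filter (fun q => q.1.2 ≠ q.1.1)).map Prod.snd
      = bnds p ws m := by
  induction ws generalizing p m with
  | nil => rfl
  | cons w ws ih =>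
    by_cases h : w = p
    · simp [List.zip_cons_cons, List.zipIdx_cons, bnds, h]
      simpa using ih p (m + 1)
    · simp [List.zip_cons_cons, List.zipIdx_cons, bnds, h]
      simpa using ih w (m + 1)

theorem bnds_count (ws : List String) (p : String) (m i : Nat) :
    ((bnds p ws m).countP (fun b => b ≤ i) : Int)
      = ((deltas p ws).take (i + 1 - m)).sum := by
  induction ws generalizing p m i with
  | nil => simp [bnds, deltas]
  | cons w ws ih =>
    rw [bnds, deltas]
    rcases Nat.lt_or_ge i m with hm | hm
    · have h1 : i + 1 - m = 0 := by omega
      have h2 : i + 1 - (m + 1) = 0 := by omega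
      have hc := ih w (m + 1) i
      rw [h2, List.take_zero, List.sum_nil] at hc
      have hc0 : (bnds w ws (m + 1)).countP (fun b => b ≤ i) = 0 := by exact_mod_cast hc
      rw [h1, List.take_zero, List.sum_nil, List.countP_append, hc0]
      by_cases h : w = p <;> simp [h, Nat.not_le.mpr hm]
    · have h1 : i + 1 - m = (i + 1 - (m + 1)) + 1 := by omega
      rw [h1, List.take_succ_cons, List.sum_cons, ← ih w (m + 1) i, List.countP_append]
      by_cases h : w = p
      · simp [h]
      · simp [h, hm]

theorem range_map_psum (ds : List Int) (s : Int) :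
    (List.range (ds.length + 1)).map (fun i => s + (ds.take i).sum) = s :: psum s ds := by
  induction ds generalizing s with
  | nil => simp [psum]
  | cons d ds ih =>
    rw [List.range_succ_eq_map, List.map_cons, List.map_map]
    simp only [List.length_cons]
    have h : ((List.range (ds.length + 1)).map ((fun i => s + ((d :: ds).take i).sum) ∘ Nat.succ))
        = (List.range (ds.length + 1)).map (fun i => (s + d) + (ds.take i).sum) := by
      apply List.map_congr_left
      intro i _
      simp [List.take_succ_cons]
      ring
    rw [h, ih]
    simp [psum]

theorem main_eq (rows : List (List (String × String))) (s : Int) :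
    assign_room_ids rows s = assign_room_ids_alt rows s := by
  unfold assign_room_ids
  rw [foldA_spec, List.nil_append]
  have halt : assign_room_ids_alt rows s =
      (List.range (rows.map pvScratch).length).map
        (fun i => s + (pvBisectRight
          (((((rows.map pvScratch).zip ((rows.map pvScratch).drop 1)).zipIdx 1).filter
            (fun q => q.1.2 ≠ q.1.1)).map Prod.snd) i : Int)) := rfl
  rw [halt]
  cases hv : rows.map pvScratch with
  | nil => simp [specRec]
  | cons v vs =>
    rw [List.drop_one, List.tail_cons, boundaries_eq]
    have hlen : (v :: vs).length = (deltas v vs).length + 1 := by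
      simp [deltas_length]
    rw [hlen]
    have hmap : (List.range ((deltas v vs).length + 1)).map
          (fun i => s + (pvBisectRight (bnds v vs 1) i : Int))
        = (List.range ((deltas v vs).length + 1)).map
          (fun i => s + ((deltas v vs).take i).sum) := by
      apply List.map_congr_left
      intro i _
      have h := bnds_count vs v 1 i
      have h1 : i + 1 - 1 = i := by omega
      rw [h1] at h
      rw [pvBisectRight, h]
    rw [hmap, range_map_psum]
    simp [specRec, specRec_psum]

-- ===== VERDICT (by name: the statement is the Claim_ definition above) =====
theorem assign_room_ids_spec : Claim_equal_assign_room_ids := by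
  intro rows s _
  unfold Spec_assign_room_ids
  exact main_eq rows s
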